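-- pv_equiv track=rewrite | github.com/beafarah/cloudcomputingensae | src/dimsum/utils/dimsum.py | dot_product_with_dict_repr
-- ===== SOURCE A (Python) =====
-- from collections import defaultdict
--
-- def dot_product_with_dict_repr(dict_repr, m, n):
--     multiplied_dict_repr = dict()
--     for i in range(n):
--         dict_col_i = {x: v for (x, y), v in dict_repr.items() if y == i}
--         dict_col_i = defaultdict(int, dict_col_i)
--         if dict_col_i:
--             for j in range(m):
--                 result = 0
--                 dict_col_j = {
--                     x: v
--                     for (x, y), v in dict_repr.items()
--                     if y == j and x in dict_col_i.keys()
--                 }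
--                 dict_col_j = defaultdict(int, dict_col_j)
--                 if dict_col_j:
--                     for x, v in dict_col_i.items():
--                         result += v * dict_col_j[x]
--                     if result != 0:
--                         multiplied_dict_repr[(i, j)] = result
--     return multiplied_dict_repr
-- ===== SOURCE B (Python) =====
-- def dot_product_with_dict_repr(dict_repr, m, n):
--     # Group entries by column once, then compute each (i, j) dot product
--     # from the precomputed columns instead of rescanning the whole dict.
--     cols = {}
--     for (x, y), v in dict_repr.items():
--         cols.setdefault(y, {})[x] = v
--     out = {}
--     for i in range(n):
--         col_i = cols.get(i)
--         if not col_i: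
--             continue
--         for j in range(m):
--             col_j = cols.get(j)
--             if not col_j:
--                 continue
--             s = 0
--             for x, v in col_i.items():
--                 s += v * col_j.get(x, 0)
--             if s != 0:
--                 out[(i, j)] = s
--     return out
-- ===== Notes on version B (the rewrite author's own statement) =====
-- stated objective: faster
-- what changed: Instead of re-scanning the whole dict to rebuild column dictionaries for every i and every (i,j) pair, B groups the entries by column in one pass and computes each (i,j) dot product from the two precomputed column dictionaries via hash lookups.
import Mathlib
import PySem

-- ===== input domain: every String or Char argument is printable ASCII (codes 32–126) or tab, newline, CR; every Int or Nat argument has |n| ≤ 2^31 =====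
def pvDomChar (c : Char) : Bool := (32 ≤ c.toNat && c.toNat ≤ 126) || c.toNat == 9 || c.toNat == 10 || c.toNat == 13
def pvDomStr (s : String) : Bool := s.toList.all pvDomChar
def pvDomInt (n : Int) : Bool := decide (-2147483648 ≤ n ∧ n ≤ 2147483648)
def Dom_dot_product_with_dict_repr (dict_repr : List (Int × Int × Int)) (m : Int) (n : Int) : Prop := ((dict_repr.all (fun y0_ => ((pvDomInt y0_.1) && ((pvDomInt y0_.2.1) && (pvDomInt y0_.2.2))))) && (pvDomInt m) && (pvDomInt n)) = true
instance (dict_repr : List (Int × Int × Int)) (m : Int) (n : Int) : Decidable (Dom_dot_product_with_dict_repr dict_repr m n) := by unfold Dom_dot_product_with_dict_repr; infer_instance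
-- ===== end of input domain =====

-- B groups the entries by column in one pass and computes each (i, j) dot product from the
-- precomputed columns, instead of A's rescan of the whole dict per column pair (faster).

-- ===== PORT A =====
-- dict comprehension {x: v for (x, y), v in dict_repr.items() if y == i}
def pvColA (l : List (Int × Int × Int)) (i : Int) : PySem.Dict Int Int :=
  (l.filter fun t => t.2.1 == i).foldl (fun d t => d.insert t.1 t.2.2) PySem.Dict.empty

-- dict comprehension {x: v for (x, y), v in dict_repr.items() if y == j and x in dict_col_i.keys()}
def pvColA2 (l : List (Int × Int × Int)) (j : Int) (ci : PySem.Dict Int Int) : PySem.Dict Int Int :=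
  (l.filter fun t => t.2.1 == j && ci.contains t.1).foldl (fun d t => d.insert t.1 t.2.2) PySem.Dict.empty

def dot_product_with_dict_repr (dict_repr : List (Int × Int × Int)) (m : Int) (n : Int) : List (Int × Int × Int) :=
  let md : PySem.Dict (Int × Int) Int :=
    (PySem.List.pyRange 0 n 1).foldl (fun md i =>
      let col_i := pvColA dict_repr i
      if col_i.items.isEmpty then md else
        (PySem.List.pyRange 0 m 1).foldl (fun md j =>
          let col_j := pvColA2 dict_repr j col_i
          if col_j.items.isEmpty then md else
            -- for x, v in dict_col_i.items(): result += v * dict_col_j[x]  (defaultdict reads 0 for a missing key)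
            let result := col_i.items.foldl (fun r p => r + p.2 * col_j.getD p.1 0) 0
            if result != 0 then md.insert (i, j) result else md) md) PySem.Dict.empty
  md.items.map (fun p => (p.1.1, p.1.2, p.2))

-- ===== PORT B =====
-- for (x, y), v in dict_repr.items(): cols.setdefault(y, {})[x] = v   (insert keeps position, appends new keys — Python mutation order)
def pvGroup (l : List (Int × Int × Int)) : PySem.Dict Int (PySem.Dict Int Int) :=
  l.foldl (fun cs t => cs.insert t.2.1 ((cs.getD t.2.1 PySem.Dict.empty).insert t.1 t.2.2)) PySem.Dict.empty

def dot_product_with_dict_repr_alt (dict_repr : List (Int × Int × Int)) (m : Int) (n : Int) : List (Int × Int × Int) :=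
  let cols := pvGroup dict_repr
  let out : PySem.Dict (Int × Int) Int :=
    (PySem.List.pyRange 0 n 1).foldl (fun out i =>
      match cols.get? i with      -- col_i = cols.get(i); if not col_i: continue
      | none => out
      | some ci =>
        if ci.items.isEmpty then out else
          (PySem.List.pyRange 0 m 1).foldl (fun out j =>
            match cols.get? j with      -- col_j = cols.get(j); if not col_j: continue
            | none => out
            | some cj =>
              if cj.items.isEmpty then out else
                let s := ci.items.foldl (fun s p => s + p.2 * cj.getD p.1 0) 0
                if s != 0 then out.insert (i, j) s else out) out) PySem.Dict.empty
  out.items.map (fun p => (p.1.1, p.1.2, p.2))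


-- ===== PRECONDITION & SPEC =====
-- dict_repr is the association list of a Python dict, whose (row, col) keys are necessarily
-- distinct; Pre_ states exactly that and excludes no input a Python caller can produce.
def Pre_dot_product_with_dict_repr (dict_repr : List (Int × Int × Int)) (m : Int) (n : Int) : Prop :=
  (dict_repr.map (fun t => (t.1, t.2.1))).Nodup
instance (dict_repr : List (Int × Int × Int)) (m : Int) (n : Int) : Decidable (Pre_dot_product_with_dict_repr dict_repr m n) := by unfold Pre_dot_product_with_dict_repr; infer_instance

def pvWitness_dot_product_with_dict_repr : (List (Int × Int × Int)) × Int × Int :=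
  ([(0, 0, 2), (1, 0, 3), (0, 1, 4)], 2, 2)

def Spec_dot_product_with_dict_repr (dict_repr : List (Int × Int × Int)) (m : Int) (n : Int) (out : List (Int × Int × Int)) : Prop := out = dot_product_with_dict_repr_alt dict_repr m n
instance (dict_repr : List (Int × Int × Int)) (m : Int) (n : Int) (out : List (Int × Int × Int)) : Decidable (Spec_dot_product_with_dict_repr dict_repr m n out) := by unfold Spec_dot_product_with_dict_repr; infer_instance

-- ===== CLAIM (what is proved, stated in full; the proofs are below) =====
def Claim_equal_dot_product_with_dict_repr : Prop := ∀ (dict_repr : List (Int × Int × Int)) (m : Int) (n : Int), Dom_dot_product_with_dict_repr dict_repr m n → Pre_dot_product_with_dict_repr dict_repr m n → Spec_dot_product_with_dict_repr dict_repr m n (dot_product_with_dict_repr dict_repr m n)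

-- ===== LEMMAS AND PROOFS =====

-- the entries of column c, in dict order, as (row, value) pairs
def pvCol (l : List (Int × Int × Int)) (c : Int) : List (Int × Int) :=
  (l.filter fun t => t.2.1 == c).map (fun t => (t.1, t.2.2))

lemma pvCol_keys_nodup (l : List (Int × Int × Int)) (c : Int)
    (h : (l.map (fun t => (t.1, t.2.1))).Nodup) :
    ((pvCol l c).map (·.1)).Nodup := by
  unfold pvCol
  have h1 : ((l.filter fun t => t.2.1 == c).map (fun t => (t.1, t.2.1))).Nodup :=
    h.sublist (List.Sublist.map _ List.filter_sublist)
  have he : ((l.filter fun t => t.2.1 == c).map (fun t => ((t.1, t.2.2) : Int × Int))).map (·.1)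
       = ((l.filter fun t => t.2.1 == c).map (fun t => (t.1, t.2.1))).map Prod.fst := by
    simp [List.map_map, Function.comp]
  rw [he]
  refine h1.map_on ?_
  intro p hp q hq hfst
  have hpc : p.2 = c := by
    simp only [List.mem_map, List.mem_filter] at hp
    obtain ⟨t, ⟨_, ht⟩, rfl⟩ := hp
    simpa using ht
  have hqc : q.2 = c := by
    simp only [List.mem_map, List.mem_filter] at hq
    obtain ⟨t, ⟨_, ht⟩, rfl⟩ := hq
    simpa using ht
  exact Prod.ext hfst (hpc.trans hqc.symm)


lemma pvColA_items (l : List (Int × Int × Int)) (i : Int)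
    (h : (l.map (fun t => (t.1, t.2.1))).Nodup) :
    (pvColA l i).items = pvCol l i := by
  unfold pvColA pvCol
  have hk : (((l.filter fun t => t.2.1 == i).map (fun t => (t.1, t.2.2))).map (·.1)).Nodup :=
    (by have hh := pvCol_keys_nodup l i h; unfold pvCol at hh; exact hh)
  rw [List.map_map] at hk
  have := PySem.Dict.items_foldl_insert_fresh (l := l.filter fun t => t.2.1 == i)
    (k := fun t => t.1) (v := fun t => t.2.2) (d := PySem.Dict.empty)
    (by intro a _; simp) (by simpa [Function.comp] using hk)
  simpa using this


lemma pvColA2_items (l : List (Int × Int × Int)) (j : Int) (ci : PySem.Dict Int Int)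
    (h : (l.map (fun t => (t.1, t.2.1))).Nodup) :
    (pvColA2 l j ci).items = (pvCol l j).filter (fun p => ci.contains p.1) := by
  unfold pvColA2 pvCol
  have hsplit : (l.filter fun t => t.2.1 == j && ci.contains t.1)
      = (l.filter fun t => t.2.1 == j).filter (fun t => ci.contains t.1) := by
    rw [List.filter_filter]
    exact List.filter_congr (by intro t _; simp [Bool.and_comm])
  have hnd : (((l.filter fun t => t.2.1 == j && ci.contains t.1).map
        (fun t => ((t.1, t.2.2) : Int × Int))).map (·.1)).Nodup := by
    refine (pvCol_keys_nodup l j h).sublist ?_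
    exact List.Sublist.map _ (List.Sublist.map _ (by rw [hsplit]; exact List.filter_sublist))
  rw [List.map_map] at hnd
  have hfresh := PySem.Dict.items_foldl_insert_fresh
    (l := l.filter fun t => t.2.1 == j && ci.contains t.1)
    (k := fun t => t.1) (v := fun t => t.2.2) (d := PySem.Dict.empty)
    (by intro a _; simp) (by simpa [Function.comp] using hnd)
  rw [hfresh, hsplit, List.filter_map]
  simp [Function.comp, PySem.Dict.empty]


lemma pvGroup_getD (l : List (Int × Int × Int)) (c : Int)
    (h : (l.map (fun t => (t.1, t.2.1))).Nodup) :
    ((pvGroup l).getD c PySem.Dict.empty).items = pvCol l c := by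
  unfold pvGroup pvCol
  induction l using List.reverseRecOn generalizing c with
  | nil => simp [PySem.Dict.empty, PySem.Dict.getD, PySem.Dict.get?]
  | append_singleton l' t ih =>
    have h' : (l'.map (fun t => (t.1, t.2.1))).Nodup := by
      rw [List.map_append] at h; exact h.of_append_left
    have hfresh : ((t.1, t.2.1) : Int × Int) ∉ l'.map (fun t => (t.1, t.2.1)) := by
      rw [List.map_append, List.nodup_append] at h
      intro hmem; exact h.2.2 _ hmem _ (by simp) rfl
    rw [List.foldl_append]
    by_cases hc : c = t.2.1
    · subst hc
      rw [List.foldl_cons, List.foldl_nil, PySem.Dict.getD_insert_self]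
      have hnc : ((l'.foldl (fun cs t => cs.insert t.2.1 ((cs.getD t.2.1 PySem.Dict.empty).insert t.1 t.2.2))
          PySem.Dict.empty).getD t.2.1 PySem.Dict.empty).contains t.1 = false := by
        rw [← Bool.not_eq_true, PySem.Dict.contains_iff_mem_keys]
        simp only [PySem.Dict.keys, ih t.2.1 h', List.mem_map]
        rintro ⟨p, hp, hp1⟩
        simp only [List.mem_filter] at hp
        obtain ⟨u, ⟨hu, huc⟩, rfl⟩ := hp
        exact hfresh (List.mem_map.mpr ⟨u, hu, by
          simp only at hp1
          exact Prod.ext hp1 (by simpa using huc)⟩)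
      rw [PySem.Dict.items_insert_of_not_contains _ _ hnc, ih t.2.1 h']
      simp
    · rw [List.foldl_cons, List.foldl_nil, PySem.Dict.getD_insert_of_ne _ _ _ hc, ih c h']
      have : (t.2.1 == c) = false := by simp [Ne.symm hc]
      simp [List.filter_append, this]


lemma getD_filter_eq (d d' : PySem.Dict Int Int) (P : Int → Bool)
    (hnd : (d'.items.map (·.1)).Nodup)
    (hitems : d.items = d'.items.filter (fun p => P p.1))
    (x : Int) (hx : P x = true) (z : Int) : d.getD x z = d'.getD x z := by
  have hndd : (d.items.map (·.1)).Nodup := by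
    rw [hitems]; exact hnd.sublist (List.Sublist.map _ List.filter_sublist)
  by_cases hmem : x ∈ d'.items.map (·.1)
  · obtain ⟨p, hp, hp1⟩ := List.mem_map.mp hmem
    obtain ⟨x, w⟩ := p
    simp only at hp1; subst hp1
    have hpd : (x, w) ∈ d.items := by
      rw [hitems]; exact List.mem_filter.mpr ⟨hp, by simpa using hx⟩
    rw [PySem.Dict.getD_of_mem_items _ hpd hndd, PySem.Dict.getD_of_mem_items _ hp hnd]
  · have hc' : d'.contains x = false := by
      rw [← Bool.not_eq_true, PySem.Dict.contains_iff_mem_keys]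
      simpa [PySem.Dict.keys] using hmem
    have hc : d.contains x = false := by
      rw [← Bool.not_eq_true, PySem.Dict.contains_iff_mem_keys]
      simp only [PySem.Dict.keys, hitems]
      intro hm
      exact hmem (List.mem_map.mp hm |>.elim fun p ⟨hp, hp1⟩ =>
        List.mem_map.mpr ⟨p, List.mem_filter.mp hp |>.1, hp1⟩)
    rw [PySem.Dict.getD_of_not_contains _ _ hc, PySem.Dict.getD_of_not_contains _ _ hc']

lemma contains_of_mem_items (d : PySem.Dict Int Int) (p : Int × Int) (hp : p ∈ d.items) :
    d.contains p.1 = true := by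
  rw [PySem.Dict.contains_iff_mem_keys]
  exact List.mem_map.mpr ⟨p, hp, rfl⟩

lemma pv_port_eq (l : List (Int × Int × Int)) (m n : Int)
    (h : (l.map (fun t => (t.1, t.2.1))).Nodup) :
    dot_product_with_dict_repr l m n = dot_product_with_dict_repr_alt l m n := by
  unfold dot_product_with_dict_repr dot_product_with_dict_repr_alt
  refine congrArg (fun d : PySem.Dict (Int × Int) Int => d.items.map (fun p => (p.1.1, p.1.2, p.2))) ?_
  refine PySem.List.foldl_congr_mem _ _ _ _ ?_
  intro md i _
  have hciA : (pvColA l i).items = pvCol l i := pvColA_items l i h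
  cases hgi : (pvGroup l).get? i with
  | none =>
    have hLi : pvCol l i = [] := by
      rw [← pvGroup_getD l i h, PySem.Dict.getD_eq_get?_getD, hgi]; rfl
    simp [hciA, hLi]
  | some ci =>
    have hci : ci.items = pvCol l i := by
      rw [← pvGroup_getD l i h, PySem.Dict.getD_eq_get?_getD, hgi]; rfl
    by_cases hLi : pvCol l i = []
    · simp [hciA, hci, hLi]
    · have he1 : (pvColA l i).items.isEmpty = false := by
        simpa [hciA, List.isEmpty_iff] using hLi
      have he2 : ci.items.isEmpty = false := by
        simpa [hci, List.isEmpty_iff] using hLi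
      simp only [he1, he2]
      refine PySem.List.foldl_congr_mem _ _ _ _ ?_
      intro md j _
      have hcjA : (pvColA2 l j (pvColA l i)).items
          = (pvCol l j).filter (fun p => (pvColA l i).contains p.1) := pvColA2_items l j _ h
      cases hgj : (pvGroup l).get? j with
      | none =>
        have hLj : pvCol l j = [] := by
          rw [← pvGroup_getD l j h, PySem.Dict.getD_eq_get?_getD, hgj]; rfl
        simp [hcjA, hLj]
      | some cj =>
        have hcj : cj.items = pvCol l j := by
          rw [← pvGroup_getD l j h, PySem.Dict.getD_eq_get?_getD, hgj]; rfl
        by_cases hLj : pvCol l j = []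
        · simp [hcjA, hcj, hLj]
        · have he2' : cj.items.isEmpty = false := by
            simpa [hcj, List.isEmpty_iff] using hLj
          simp only [he2']
          have hnd : (cj.items.map (·.1)).Nodup := by
            rw [hcj]; exact pvCol_keys_nodup l j h
          have hterm : ∀ (r : Int), ∀ p ∈ (pvColA l i).items,
              r + p.2 * (pvColA2 l j (pvColA l i)).getD p.1 0 = r + p.2 * cj.getD p.1 0 := by
            intro r p hp
            have hx : (pvColA l i).contains p.1 = true := contains_of_mem_items _ p hp
            rw [getD_filter_eq (pvColA2 l j (pvColA l i)) cj ((pvColA l i).contains ·)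
              hnd (by rw [hcjA, hcj]) p.1 hx 0]
          by_cases hF : (pvCol l j).filter (fun p => (pvColA l i).contains p.1) = []
          · -- A skips; show B's s = 0
            have hs : ci.items.foldl (fun s p => s + p.2 * cj.getD p.1 0) 0 = 0 := by
              have : ∀ (s : Int), ∀ p ∈ ci.items, s + p.2 * cj.getD p.1 0 = s := by
                intro s p hp
                have hx : (pvColA l i).contains p.1 = true := by
                  refine contains_of_mem_items _ p ?_
                  rw [hciA, ← hci]; exact hp
                have : (pvColA2 l j (pvColA l i)).getD p.1 0 = cj.getD p.1 0 :=
                  getD_filter_eq _ cj ((pvColA l i).contains ·) hnd (by rw [hcjA, hcj]) p.1 hx 0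
                have hz : (pvColA2 l j (pvColA l i)).getD p.1 0 = 0 := by
                  refine PySem.Dict.getD_of_not_contains _ _ ?_
                  rw [← Bool.not_eq_true, PySem.Dict.contains_iff_mem_keys]
                  simp [PySem.Dict.keys, hcjA, hF]
                rw [← this, hz]; ring
              rw [PySem.List.foldl_congr_mem _ _ (fun s _ => s) _ this]
              simp
            simp [hcjA, hF, hs]
          · have heF : (pvColA2 l j (pvColA l i)).items.isEmpty = false := by
              simpa [hcjA, List.isEmpty_iff] using hF
            simp only [heF]
            have hres : (pvColA l i).items.foldl
                (fun r p => r + p.2 * (pvColA2 l j (pvColA l i)).getD p.1 0) 0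
                = ci.items.foldl (fun s p => s + p.2 * cj.getD p.1 0) 0 := by
              rw [PySem.List.foldl_congr_mem _ _ _ _ (fun r p hp => hterm r p hp)]
              rw [hciA, ← hci]
            rw [hres]

-- ===== VERDICT (by name: the statement is the Claim_ definition above) =====
theorem dot_product_with_dict_repr_spec : Claim_equal_dot_product_with_dict_repr := by
  intro dict_repr m n _ hpre
  unfold Spec_dot_product_with_dict_repr
  exact pv_port_eq dict_repr m n hpre
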